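-- pv_equiv track=rewrite | github.com/veeeceee/jg-cli | src/jg/commands/edit.py | _normalize_priority
-- ===== SOURCE A (Python) =====
-- PRIORITY_NAMES = ("Highest", "High", "Medium", "Low", "Lowest")
--
-- def _normalize_priority(p: str) -> str | None:
--     p_low = p.lower()
--     # Prefer exact match (so "high" → "High", not "Highest")
--     for name in PRIORITY_NAMES:
--         if name.lower() == p_low:
--             return name
--     for name in PRIORITY_NAMES:
--         if name.lower().startswith(p_low):
--             return name
--     return None
-- ===== SOURCE B (Python) =====
-- PRIORITY_NAMES = ("Highest", "High", "Medium", "Low", "Lowest")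
--
-- def _normalize_priority(p: str) -> str | None:
--     # One scan: return immediately on an exact match, remember the first
--     # prefix match and fall back to it after the loop.
--     p_low = p.lower()
--     prefix_hit = None
--     for name in PRIORITY_NAMES:
--         low = name.lower()
--         if low == p_low:
--             return name
--         if prefix_hit is None and low.startswith(p_low):
--             prefix_hit = name
--     return prefix_hit
-- ===== Notes on version B (the rewrite author's own statement) =====
-- stated objective: alternative
-- what changed: Replaces A's two sequential scans of PRIORITY_NAMES (exact pass, then prefix pass) by a single scan that returns on an exact match and keeps the first prefix match in an accumulator for the fallback.
import Mathlib
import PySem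

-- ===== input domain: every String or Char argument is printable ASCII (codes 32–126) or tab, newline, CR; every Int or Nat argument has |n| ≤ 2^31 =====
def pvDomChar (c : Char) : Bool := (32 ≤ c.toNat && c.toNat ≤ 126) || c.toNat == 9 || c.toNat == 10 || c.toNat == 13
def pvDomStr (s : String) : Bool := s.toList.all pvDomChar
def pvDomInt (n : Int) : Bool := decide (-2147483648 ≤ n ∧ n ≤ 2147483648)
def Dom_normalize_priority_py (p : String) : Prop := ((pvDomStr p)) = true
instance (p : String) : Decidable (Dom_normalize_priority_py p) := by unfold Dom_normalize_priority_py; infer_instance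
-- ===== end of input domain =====

-- ===== PORT A =====
-- B changes only the decomposition (one scan with retained state instead of two scans); same cost.
def PRIORITY_NAMES : List String := ["Highest", "High", "Medium", "Low", "Lowest"]

def pvAExact (p_low : String) : List String → Option String
  | [] => none
  | name :: rest =>
    if PySem.Str.lower name == p_low then some name else pvAExact p_low rest

def pvAPrefix (p_low : String) : List String → Option String
  | [] => none
  | name :: rest =>
    if PySem.Str.startswith (PySem.Str.lower name) p_low then some name
    else pvAPrefix p_low rest

def normalize_priority_py (p : String) : Option String :=
  let p_low := PySem.Str.lower p
  match pvAExact p_low PRIORITY_NAMES with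
  | some name => some name
  | none => pvAPrefix p_low PRIORITY_NAMES

-- ===== PORT B =====
def pvBLoop (p_low : String) (prefix_hit : Option String) : List String → Option String
  | [] => prefix_hit
  | name :: rest =>
    let low := PySem.Str.lower name
    if low == p_low then some name
    else
      pvBLoop p_low
        (if prefix_hit.isNone && PySem.Str.startswith low p_low then some name
         else prefix_hit) rest

def normalize_priority_py_alt (p : String) : Option String :=
  let p_low := PySem.Str.lower p
  pvBLoop p_low none PRIORITY_NAMES

-- ===== PRECONDITION & SPEC =====
def Spec_normalize_priority_py (p : String) (out : Option String) : Prop := out = normalize_priority_py_alt p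
instance (p : String) (out : Option String) : Decidable (Spec_normalize_priority_py p out) := by unfold Spec_normalize_priority_py; infer_instance

-- ===== CLAIM (what is proved, stated in full; the proofs are below) =====
def Claim_equal_normalize_priority_py : Prop := ∀ (p : String), Dom_normalize_priority_py p → Spec_normalize_priority_py p (normalize_priority_py p)

-- ===== LEMMAS AND PROOFS =====

-- ===== VERDICT (by name: the statement is the Claim_ definition above) =====
-- The one-pass loop with accumulator equals: exact scan first, else the accumulator, else the prefix scan.
theorem pvBLoop_eq (p_low : String) : ∀ (names : List String) (acc : Option String),
    pvBLoop p_low acc names =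
      (match pvAExact p_low names with
       | some n => some n
       | none =>
         match acc with
         | some a => some a
         | none => pvAPrefix p_low names) := by
  intro names
  induction names with
  | nil => intro acc; cases acc <;> rfl
  | cons name rest ih =>
    intro acc
    simp only [pvBLoop, pvAExact, pvAPrefix]
    by_cases h1 : (PySem.Str.lower name == p_low) = true
    · simp [h1]
    · cases acc with
      | some a => simp [h1, ih]
      | none =>
        simp only [h1, Bool.false_eq_true, if_false, Option.isNone_none, Bool.true_and, ih]
        cases pvAExact p_low rest with
        | none =>
            by_cases h2 : PySem.Str.startswith (PySem.Str.lower name) p_low = true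
            · rw [if_pos h2, if_pos h2]
            · rw [if_neg h2, if_neg h2]
        | some n => rfl

theorem normalize_priority_py_spec : Claim_equal_normalize_priority_py := by
  intro p _
  unfold Spec_normalize_priority_py normalize_priority_py normalize_priority_py_alt
  rw [pvBLoop_eq]
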